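-- pv_equiv track=rewrite | github.com/2152133/WikipediaWebCrawl | main.py | continue_crawl
-- ===== SOURCE A (Python) =====
-- def continue_crawl(search_history, target_url):
--     if search_history[-1] == target_url:
--         return False
--     if len(search_history) > 25:
--         return False
--     i = 0
--     while(i < len(search_history)):
--         j = i+1
--         while(j < len(search_history)):
--             if search_history[i] == search_history[j]:
--                 return False
--             j += 1
--         i += 1
--     return True
-- ===== SOURCE B (Python) =====
-- def continue_crawl(search_history, target_url):
--     if search_history[-1] == target_url:
--         return False
--     if len(search_history) > 25:
--         return False
--     return len(set(search_history)) == len(search_history)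
-- ===== Notes on version B (the rewrite author's own statement) =====
-- stated objective: simpler
-- what changed: The nested all-pairs while-loop duplicate scan is replaced by a single set-based uniqueness test (len(set(xs)) == len(xs)); the two leading guards are kept.
import Mathlib
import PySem

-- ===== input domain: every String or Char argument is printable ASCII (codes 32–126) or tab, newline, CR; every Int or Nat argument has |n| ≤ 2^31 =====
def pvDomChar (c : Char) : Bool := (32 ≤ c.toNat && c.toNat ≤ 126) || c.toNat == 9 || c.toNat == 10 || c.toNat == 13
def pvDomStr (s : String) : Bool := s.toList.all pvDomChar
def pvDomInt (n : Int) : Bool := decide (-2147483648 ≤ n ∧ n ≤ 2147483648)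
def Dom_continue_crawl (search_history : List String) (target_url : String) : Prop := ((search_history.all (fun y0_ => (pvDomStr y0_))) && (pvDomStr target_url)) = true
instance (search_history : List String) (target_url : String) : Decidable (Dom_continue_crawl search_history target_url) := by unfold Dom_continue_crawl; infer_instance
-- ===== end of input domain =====

-- B replaces A's nested-loop duplicate scan by a single set-based uniqueness test (simpler; the len>25 guard keeps large inputs out of the scan, so no speed claim).

-- ===== PORT A =====
-- inner while loop: j scans upward comparing search_history[i] with search_history[j];
-- returns true = "no duplicate found, continue", false = "return False"
def ccInner (xs : List String) (i : Nat) (j : Nat) : Bool :=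
  if j < xs.length then
    if xs.getD i "" == xs.getD j "" then false
    else ccInner xs i (j + 1)
  else true
termination_by xs.length - j

-- outer while loop over i
def ccOuter (xs : List String) (i : Nat) : Bool :=
  if i < xs.length then
    if ccInner xs i (i + 1) then ccOuter xs (i + 1) else false
  else true
termination_by xs.length - i

def continue_crawl (search_history : List String) (target_url : String) : Bool :=
  match PySem.List.pyGet? search_history (-1) with   -- search_history[-1]; none = IndexError, excluded by Pre_
  | none => false
  | some last =>
    if last == target_url then false
    else if search_history.length > 25 then false
    else ccOuter search_history 0

-- ===== PORT B =====
def continue_crawl_alt (search_history : List String) (target_url : String) : Bool :=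
  match PySem.List.pyGet? search_history (-1) with   -- search_history[-1]; none = IndexError, excluded by Pre_
  | none => false
  | some last =>
    if last == target_url then false
    else if search_history.length > 25 then false
    else (PySem.Set.ofList search_history).length == search_history.length

-- ===== PRECONDITION & SPEC =====
-- Pre_ excludes only the empty history, on which A (and B) raise IndexError at search_history[-1].
def Pre_continue_crawl (search_history : List String) (target_url : String) : Prop :=
  search_history ≠ []
instance (search_history : List String) (target_url : String) : Decidable (Pre_continue_crawl search_history target_url) := by unfold Pre_continue_crawl; infer_instance

def pvWitness_continue_crawl : List String × String := (["a", "b"], "c")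

def Spec_continue_crawl (search_history : List String) (target_url : String) (out : Bool) : Prop := out = continue_crawl_alt search_history target_url
instance (search_history : List String) (target_url : String) (out : Bool) : Decidable (Spec_continue_crawl search_history target_url out) := by unfold Spec_continue_crawl; infer_instance

-- ===== CLAIM (what is proved, stated in full; the proofs are below) =====
def Claim_equal_continue_crawl : Prop := ∀ (search_history : List String) (target_url : String), Dom_continue_crawl search_history target_url → Pre_continue_crawl search_history target_url → Spec_continue_crawl search_history target_url (continue_crawl search_history target_url)

-- ===== LEMMAS AND PROOFS =====

-- the inner loop finds a duplicate of xs[i] among indices ≥ j iff xs[i] occurs in xs.drop j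
theorem ccInner_eq (xs : List String) (i j : Nat) :
    ccInner xs i j = !((xs.drop j).contains (xs.getD i "")) := by
  by_cases h : j < xs.length
  · rw [ccInner, if_pos h, ccInner_eq xs i (j + 1), List.drop_eq_getElem_cons h]
    by_cases he : xs.getD i "" = xs.getD j ""
    · simp only [List.getD_eq_getElem xs "" h] at he
      simp only [he, List.getD_eq_getElem xs "" h, List.contains_cons, beq_self_eq_true,
        Bool.true_or, Bool.not_true, if_pos, beq_iff_eq]
    · simp only [List.getD_eq_getElem xs "" h] at he ⊢
      have he' : ¬ xs[i]?.getD "" = xs[j] := he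
      simp [he']
      rw [List.drop_eq_getElem_cons h, List.mem_cons]
      exact ⟨Or.inr, fun hc => hc.resolve_left he'⟩
  · rw [ccInner, if_neg h]
    rw [List.drop_eq_nil_of_le (by omega)]
    simp
termination_by xs.length - j

-- the outer loop succeeds iff the suffix from i is duplicate-free
theorem ccOuter_eq (xs : List String) (i : Nat) :
    ccOuter xs i = decide (xs.drop i).Nodup := by
  by_cases h : i < xs.length
  · rw [ccOuter, if_pos h, ccInner_eq, ccOuter_eq xs (i + 1),
        List.drop_eq_getElem_cons h, List.getD_eq_getElem xs "" h]
    by_cases hm : xs[i] ∈ xs.drop (i + 1)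
    · simp only [List.nodup_cons, hm, List.contains_eq_mem, decide_true, Bool.not_true,
        Bool.false_eq, if_neg, decide_eq_false_iff_not, not_and]
      simp [hm]
    · simp only [List.nodup_cons, hm, List.contains_eq_mem, decide_false, Bool.not_false, if_pos]
      simp [hm]
  · rw [ccOuter, if_neg h, List.drop_eq_nil_of_le (by omega)]
    simp
termination_by xs.length - i

-- set(xs) has the same length as xs exactly when xs is duplicate-free
theorem ofList_length_eq_iff (xs : List String) :
    ((PySem.Set.ofList xs).length == xs.length) = decide xs.Nodup := by
  induction xs with
  | nil => simp [PySem.Set.ofList_nil]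
  | cons x xs ih =>
    rw [PySem.Set.ofList_cons]
    by_cases hm : x ∈ xs
    · have hd : (PySem.Set.discard (PySem.Set.ofList xs) x).length < (PySem.Set.ofList xs).length := by
        have hx : x ∈ PySem.Set.ofList xs := (PySem.Set.mem_ofList xs x).2 hm
        simp only [PySem.Set.discard]
        exact List.length_filter_lt_length_iff_exists.2 ⟨x, hx, by simp⟩
      have hle := PySem.Set.length_ofList_le xs
      simp only [List.length_cons, List.nodup_cons]
      simp only [hm, not_true, false_and, decide_false]
      simp only [beq_eq_false_iff_ne, ne_eq]
      omega
    · have hd : PySem.Set.discard (PySem.Set.ofList xs) x = PySem.Set.ofList xs := by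
        simp only [PySem.Set.discard]
        refine List.filter_eq_self.2 (fun y hy => ?_)
        have : y ∈ xs := (PySem.Set.mem_ofList xs y).1 hy
        simp; rintro rfl; exact hm this
      simp only [hd, List.length_cons, List.nodup_cons, hm, not_false_iff, true_and]
      rw [← ih]
      simp

-- ===== VERDICT (by name: the statement is the Claim_ definition above) =====
theorem continue_crawl_spec : Claim_equal_continue_crawl := by
  intro xs t _ _
  unfold Spec_continue_crawl continue_crawl continue_crawl_alt
  cases PySem.List.pyGet? xs (-1) with
  | none => rfl
  | some last =>
    simp only []
    split
    · rfl
    · split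
      · rfl
      · rw [ccOuter_eq, List.drop_zero, ofList_length_eq_iff]
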